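-- pv_equiv track=rewrite | github.com/evansss111/zipr | zipr/core.py | _split_top
-- ===== SOURCE A (Python) =====
-- def _split_top(s: str, sep: str) -> list[str]:
--     """Split on sep but not inside brackets/braces/quotes."""
--     parts: list[str] = []
--     depth = 0
--     buf: list[str] = []
--     in_quote = False
--     i = 0
--     while i < len(s):
--         c = s[i]
--         if c == "\\" and in_quote and i + 1 < len(s):
--             buf.append(c)
--             buf.append(s[i + 1])
--             i += 2
--             continue
--         if c == '"':
--             in_quote = not in_quote
--             buf.append(c)
--         elif in_quote:
--             buf.append(c)
--         elif c in "([{":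
--             depth += 1
--             buf.append(c)
--         elif c in ")]}":
--             depth -= 1
--             buf.append(c)
--         elif c == sep and depth == 0:
--             parts.append("".join(buf))
--             buf = []
--         else:
--             buf.append(c)
--         i += 1
--     if buf:
--         parts.append("".join(buf))
--     return [p for p in parts if p]
-- ===== SOURCE B (Python) =====
-- def _split_top(s: str, sep: str) -> list[str]:
--     """Split on sep but not inside brackets/braces/quotes.
--
--     Two-phase: one scan records the indices of top-level separators
--     (no character buffer), then the parts are cut out of s by slicing.
--     """
--     cuts: list[int] = []
--     depth = 0
--     in_quote = False
--     n = len(s)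
--     i = 0
--     while i < n:
--         c = s[i]
--         if c == "\\" and in_quote and i + 1 < n:
--             i += 2
--             continue
--         if c == '"':
--             in_quote = not in_quote
--         elif in_quote:
--             pass
--         elif c in "([{":
--             depth += 1
--         elif c in ")]}":
--             depth -= 1
--         elif c == sep and depth == 0:
--             cuts.append(i)
--         i += 1
--     parts: list[str] = []
--     prev = 0
--     for cut in cuts:
--         parts.append(s[prev:cut])
--         prev = cut + 1
--     parts.append(s[prev:])
--     return [p for p in parts if p]
-- ===== Notes on version B (the rewrite author's own statement) =====
-- stated objective: alternative
-- what changed: B replaces A's character-buffer accumulation (append each kept char to buf, flush buf at separators) by a two-phase scheme: one scan records only the indices of top-level separators, then the parts are obtained by slicing the original string between consecutive cut indices.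
import Mathlib
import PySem

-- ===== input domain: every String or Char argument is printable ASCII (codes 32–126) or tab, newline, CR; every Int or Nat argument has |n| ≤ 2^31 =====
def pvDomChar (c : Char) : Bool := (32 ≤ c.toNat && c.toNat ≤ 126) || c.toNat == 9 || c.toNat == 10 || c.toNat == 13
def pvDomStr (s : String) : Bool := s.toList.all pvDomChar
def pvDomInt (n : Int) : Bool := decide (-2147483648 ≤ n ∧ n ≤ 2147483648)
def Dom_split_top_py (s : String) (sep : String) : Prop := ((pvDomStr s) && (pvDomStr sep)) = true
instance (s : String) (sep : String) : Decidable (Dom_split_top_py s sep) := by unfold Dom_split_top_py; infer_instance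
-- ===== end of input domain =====

-- B replaces A's character-buffer accumulation by a two-phase scheme (record top-level
-- separator indices, then slice the string between them); same return value, different decomposition.

-- ===== PORT A =====
-- A's while-loop, consuming s char by char (s[i]/s[i+1] become the list head(s));
-- parts/buf are lists of chars, "".join at the end via String.ofList.
def splitTopLoopA (sepL : List Char) : List Char → Int → List Char → Bool → List (List Char) → List (List Char)
  | [], _, buf, _, parts => parts ++ (if buf = [] then [] else [buf])
  | c :: rest, depth, buf, inq, parts =>
    if h : c = '\\' ∧ inq = true ∧ rest ≠ [] then
      match rest, h.2.2 with
      | d :: rest', _ => splitTopLoopA sepL rest' depth (buf ++ [c] ++ [d]) inq parts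
    else if c = '"' then splitTopLoopA sepL rest depth (buf ++ [c]) (!inq) parts
    else if inq = true then splitTopLoopA sepL rest depth (buf ++ [c]) inq parts
    else if c = '(' ∨ c = '[' ∨ c = '{' then splitTopLoopA sepL rest (depth + 1) (buf ++ [c]) inq parts
    else if c = ')' ∨ c = ']' ∨ c = '}' then splitTopLoopA sepL rest (depth - 1) (buf ++ [c]) inq parts
    else if [c] = sepL ∧ depth = 0 then splitTopLoopA sepL rest depth [] inq (parts ++ [buf])
    else splitTopLoopA sepL rest depth (buf ++ [c]) inq parts

def split_top_py (s : String) (sep : String) : List String :=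
  ((splitTopLoopA sep.toList s.toList 0 [] false []).filter (fun p => !p.isEmpty)).map
    (fun p => String.ofList p)

-- ===== PORT B =====
-- B phase 1: the same while-loop shape, but recording only the indices of top-level
-- separators (i is the position counter; no character buffer).
def cutsLoopB (sepL : List Char) : List Char → Nat → Int → Bool → List Nat → List Nat
  | [], _, _, _, cuts => cuts
  | c :: rest, i, depth, inq, cuts =>
    if h : c = '\\' ∧ inq = true ∧ rest ≠ [] then
      match rest, h.2.2 with
      | _ :: rest', _ => cutsLoopB sepL rest' (i + 2) depth inq cuts
    else if c = '"' then cutsLoopB sepL rest (i + 1) depth (!inq) cuts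
    else if inq = true then cutsLoopB sepL rest (i + 1) depth inq cuts
    else if c = '(' ∨ c = '[' ∨ c = '{' then cutsLoopB sepL rest (i + 1) (depth + 1) inq cuts
    else if c = ')' ∨ c = ']' ∨ c = '}' then cutsLoopB sepL rest (i + 1) (depth - 1) inq cuts
    else if [c] = sepL ∧ depth = 0 then cutsLoopB sepL rest (i + 1) depth inq (cuts ++ [i])
    else cutsLoopB sepL rest (i + 1) depth inq cuts

-- B phase 2: slice s between consecutive cuts (s[prev:cut], finally s[prev:]).
def partsLoopB (cs : List Char) : Nat → List Nat → List (List Char)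
  | prev, [] => [PySem.List.slice cs (some (prev : Int)) none]
  | prev, cut :: rest =>
    PySem.List.slice cs (some (prev : Int)) (some (cut : Int)) :: partsLoopB cs (cut + 1) rest

def split_top_py_alt (s : String) (sep : String) : List String :=
  ((partsLoopB s.toList 0 (cutsLoopB sep.toList s.toList 0 0 false [])).filter
      (fun p => !p.isEmpty)).map (fun p => String.ofList p)

-- ===== PRECONDITION & SPEC =====
def Spec_split_top_py (s : String) (sep : String) (out : List String) : Prop := out = split_top_py_alt s sep
instance (s : String) (sep : String) (out : List String) : Decidable (Spec_split_top_py s sep out) := by unfold Spec_split_top_py; infer_instance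

-- ===== CLAIM (what is proved, stated in full; the proofs are below) =====
def Claim_equal_split_top_py : Prop := ∀ (s : String) (sep : String), Dom_split_top_py s sep → Spec_split_top_py s sep (split_top_py s sep)

-- ===== LEMMAS AND PROOFS =====

-- accumulator-free segment characterization of A's loop (proof helper)
def segsA (sepL : List Char) : List Char → Int → List Char → Bool → List (List Char)
  | [], _, buf, _ => if buf = [] then [] else [buf]
  | c :: rest, depth, buf, inq =>
    if h : c = '\\' ∧ inq = true ∧ rest ≠ [] then
      match rest, h.2.2 with
      | d :: rest', _ => segsA sepL rest' depth (buf ++ [c] ++ [d]) inq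
    else if c = '"' then segsA sepL rest depth (buf ++ [c]) (!inq)
    else if inq = true then segsA sepL rest depth (buf ++ [c]) inq
    else if c = '(' ∨ c = '[' ∨ c = '{' then segsA sepL rest (depth + 1) (buf ++ [c]) inq
    else if c = ')' ∨ c = ']' ∨ c = '}' then segsA sepL rest (depth - 1) (buf ++ [c]) inq
    else if [c] = sepL ∧ depth = 0 then buf :: segsA sepL rest depth [] inq
    else segsA sepL rest depth (buf ++ [c]) inq

-- like segsA but always emits the final buffer (the difference is filtered away)
def segsRawA (sepL : List Char) : List Char → Int → List Char → Bool → List (List Char)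
  | [], _, buf, _ => [buf]
  | c :: rest, depth, buf, inq =>
    if h : c = '\\' ∧ inq = true ∧ rest ≠ [] then
      match rest, h.2.2 with
      | d :: rest', _ => segsRawA sepL rest' depth (buf ++ [c] ++ [d]) inq
    else if c = '"' then segsRawA sepL rest depth (buf ++ [c]) (!inq)
    else if inq = true then segsRawA sepL rest depth (buf ++ [c]) inq
    else if c = '(' ∨ c = '[' ∨ c = '{' then segsRawA sepL rest (depth + 1) (buf ++ [c]) inq
    else if c = ')' ∨ c = ']' ∨ c = '}' then segsRawA sepL rest (depth - 1) (buf ++ [c]) inq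
    else if [c] = sepL ∧ depth = 0 then buf :: segsRawA sepL rest depth [] inq
    else segsRawA sepL rest depth (buf ++ [c]) inq

-- accumulator-free cut list (proof helper)
def cutsF (sepL : List Char) : List Char → Nat → Int → Bool → List Nat
  | [], _, _, _ => []
  | c :: rest, i, depth, inq =>
    if h : c = '\\' ∧ inq = true ∧ rest ≠ [] then
      match rest, h.2.2 with
      | _ :: rest', _ => cutsF sepL rest' (i + 2) depth inq
    else if c = '"' then cutsF sepL rest (i + 1) depth (!inq)
    else if inq = true then cutsF sepL rest (i + 1) depth inq
    else if c = '(' ∨ c = '[' ∨ c = '{' then cutsF sepL rest (i + 1) (depth + 1) inq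
    else if c = ')' ∨ c = ']' ∨ c = '}' then cutsF sepL rest (i + 1) (depth - 1) inq
    else if [c] = sepL ∧ depth = 0 then i :: cutsF sepL rest (i + 1) depth inq
    else cutsF sepL rest (i + 1) depth inq

theorem pv_drop_cons (cs : List Char) (i : Nat) (h : i < cs.length) :
    cs.drop i = cs[i] :: cs.drop (i + 1) := by
  exact (List.getElem_cons_drop h).symm

theorem pv_take_snoc (cs : List Char) (start i : Nat) (hsi : start ≤ i) (h : i < cs.length) :
    (cs.drop start).take (i - start) ++ [cs[i]] = (cs.drop start).take (i + 1 - start) := by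
  have e : i + 1 - start = (i - start) + 1 := by omega
  rw [e, List.take_add_one]
  have hg : (cs.drop start)[i - start]? = some cs[i] := by
    rw [List.getElem?_drop]
    have e2 : start + (i - start) = i := by omega
    rw [e2, List.getElem?_eq_getElem h]
  rw [hg]
  simp

theorem splitTopLoopA_eq_segsA (sepL : List Char) (cs : List Char) (depth : Int)
    (buf : List Char) (inq : Bool) (parts : List (List Char)) :
    splitTopLoopA sepL cs depth buf inq parts = parts ++ segsA sepL cs depth buf inq := by
  induction cs, depth, buf, inq, parts using splitTopLoopA.induct sepL
  all_goals simp_all [splitTopLoopA, segsA]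
  all_goals (split <;> simp_all)

theorem cutsLoopB_eq_cutsF (sepL : List Char) (cs : List Char) (i : Nat) (depth : Int)
    (inq : Bool) (cuts : List Nat) :
    cutsLoopB sepL cs i depth inq cuts = cuts ++ cutsF sepL cs i depth inq := by
  induction cs, i, depth, inq, cuts using cutsLoopB.induct sepL
  all_goals simp_all [cutsLoopB, cutsF]
  all_goals (split <;> simp_all)

theorem filter_segsA_eq_filter_segsRawA (sepL : List Char) (cs : List Char) (depth : Int)
    (buf : List Char) (inq : Bool) :
    (segsA sepL cs depth buf inq).filter (fun p => !p.isEmpty)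
      = (segsRawA sepL cs depth buf inq).filter (fun p => !p.isEmpty) := by
  induction cs, depth, buf, inq using segsA.induct sepL
  all_goals simp_all [segsA, segsRawA, List.filter]
  all_goals (split <;> simp_all)

theorem pv_base_case (sepL cs : List Char) (i start : Nat) (depth : Int) (inq : Bool)
    (hdrop : cs.drop i = []) (hsi : start ≤ i) :
    segsRawA sepL [] depth ((cs.drop start).take (i - start)) inq
      = partsLoopB cs start (cutsF sepL [] i depth inq) := by
  have hge : cs.length ≤ i := by
    have := congrArg List.length hdrop
    simp at this
    omega
  simp only [segsRawA, cutsF, partsLoopB, PySem.List.slice_from_natCast]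
  rw [List.take_of_length_le (by simp; omega)]

theorem segsRawA_eq_partsLoopB_aux (sepL cs : List Char) (k : Nat) :
    ∀ (rest : List Char) (i : Nat) (depth : Int) (inq : Bool) (start : Nat),
      rest.length ≤ k → cs.drop i = rest → start ≤ i →
      segsRawA sepL rest depth ((cs.drop start).take (i - start)) inq
        = partsLoopB cs start (cutsF sepL rest i depth inq) := by
  induction k with
  | zero =>
    intro rest i depth inq start hk hdrop hsi
    have hnil : rest = [] := by cases rest <;> simp_all
    subst hnil
    exact pv_base_case sepL cs i start depth inq hdrop hsi
  | succ k IH =>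
    intro rest i depth inq start hk hdrop hsi
    cases rest with
    | nil => exact pv_base_case sepL cs i start depth inq hdrop hsi
    | cons c rest2 =>
      have hlen : cs.length - i = rest2.length + 1 := by
        have := congrArg List.length hdrop
        simpa using this
      have h1 : i < cs.length := by omega
      have hh : cs[i] :: cs.drop (i + 1) = c :: rest2 := (pv_drop_cons cs i h1).symm.trans hdrop
      injection hh with hc hrest
      simp only [segsRawA, cutsF]
      by_cases hb : c = '\\' ∧ inq = true ∧ rest2 ≠ []
      · simp only [dif_pos hb]
        obtain ⟨d, rest3, rfl⟩ : ∃ d r3, rest2 = d :: r3 := by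
          cases rest2 with
          | nil => exact absurd rfl hb.2.2
          | cons d r => exact ⟨d, r, rfl⟩
        have h1b : i + 1 < cs.length := by
          have := congrArg List.length hrest
          simp at this
          omega
        have hh2 : cs[i+1] :: cs.drop (i + 2) = d :: rest3 := by
          have := (pv_drop_cons cs (i + 1) h1b).symm.trans hrest
          rwa [show i + 1 + 1 = i + 2 from by omega] at this
        injection hh2 with hd hrest2
        dsimp only
        rw [← hc, ← hd, pv_take_snoc cs start i hsi h1,
          pv_take_snoc cs start (i + 1) (by omega) h1b]
        rw [show i + 1 + 1 = i + 2 from by omega]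
        exact IH rest3 (i + 2) depth inq start (by simp at hk; omega) hrest2 (by omega)
      · simp only [dif_neg hb]
        have hk2 : rest2.length ≤ k := by simp at hk; omega
        by_cases hq : c = '"'
        · simp only [if_pos hq]
          rw [← hc, pv_take_snoc cs start i hsi h1]
          exact IH rest2 (i + 1) depth (!inq) start hk2 hrest (by omega)
        · simp only [if_neg hq]
          by_cases hin : inq = true
          · simp only [if_pos hin]
            rw [← hc, pv_take_snoc cs start i hsi h1]
            exact IH rest2 (i + 1) depth inq start hk2 hrest (by omega)
          · simp only [if_neg hin]
            by_cases hbr : c = '(' ∨ c = '[' ∨ c = '{'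
            · simp only [if_pos hbr]
              rw [← hc, pv_take_snoc cs start i hsi h1]
              exact IH rest2 (i + 1) (depth + 1) inq start hk2 hrest (by omega)
            · simp only [if_neg hbr]
              by_cases hcl : c = ')' ∨ c = ']' ∨ c = '}'
              · simp only [if_pos hcl]
                rw [← hc, pv_take_snoc cs start i hsi h1]
                exact IH rest2 (i + 1) (depth - 1) inq start hk2 hrest (by omega)
              · simp only [if_neg hcl]
                by_cases hsep : [c] = sepL ∧ depth = 0
                · simp only [if_pos hsep]
                  simp only [partsLoopB, PySem.List.slice_natCast]
                  refine congrArg₂ (· :: ·) rfl ?_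
                  have h0 := IH rest2 (i + 1) depth inq (i + 1) hk2 hrest (le_refl _)
                  simpa using h0
                · simp only [if_neg hsep]
                  rw [← hc, pv_take_snoc cs start i hsi h1]
                  exact IH rest2 (i + 1) depth inq start hk2 hrest (by omega)

theorem segsRawA_eq_partsLoopB (sepL cs : List Char) (i : Nat) (depth : Int)
    (inq : Bool) (start : Nat) (hsi : start ≤ i) :
    segsRawA sepL (cs.drop i) depth ((cs.drop start).take (i - start)) inq
      = partsLoopB cs start (cutsF sepL (cs.drop i) i depth inq) := by
  exact segsRawA_eq_partsLoopB_aux sepL cs (cs.drop i).length (cs.drop i) i depth inq start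
    (le_refl _) rfl hsi

-- ===== VERDICT (by name: the statement is the Claim_ definition above) =====
theorem split_top_py_spec : Claim_equal_split_top_py := by
  intro s sep _
  unfold Spec_split_top_py split_top_py split_top_py_alt
  rw [splitTopLoopA_eq_segsA, List.nil_append, cutsLoopB_eq_cutsF, List.nil_append,
    filter_segsA_eq_filter_segsRawA]
  have h := segsRawA_eq_partsLoopB sep.toList s.toList 0 0 false 0 (le_refl 0)
  simp only [List.drop_zero, Nat.sub_self, List.take_zero] at h
  rw [h]
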